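-- pv_equiv track=rewrite | github.com/fish-and-bear/lexicon-gnn-ph | .history/backend/dictionary_manager_20250324002936.py | standardize_pos
-- ===== SOURCE A (Python) =====
-- POS_MAPPING = {
--     'noun': {'en': 'Noun', 'tl': 'Pangngalan', 'abbreviations': ['n', 'png'], 'variants': []},
--     'adjective': {'en': 'Adjective', 'tl': 'Pang-uri', 'abbreviations': ['adj', 'pnr'], 'variants': []},
--     'verb': {'en': 'Verb', 'tl': 'Pandiwa', 'abbreviations': ['v', 'pnw'], 'variants': []},
--     'adverb': {'en': 'Adverb', 'tl': 'Pang-abay', 'abbreviations': ['adv', 'pny'], 'variants': []},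
--     'pronoun': {'en': 'Pronoun', 'tl': 'Panghalip', 'abbreviations': ['pron'], 'variants': []},
--     'preposition': {'en': 'Preposition', 'tl': 'Pang-ukol', 'abbreviations': ['prep'], 'variants': []},
--     'conjunction': {'en': 'Conjunction', 'tl': 'Pangatnig', 'abbreviations': ['conj'], 'variants': []},
--     'interjection': {'en': 'Interjection', 'tl': 'Pandamdam', 'abbreviations': ['intj'], 'variants': []},
--     'affix': {'en': 'Affix', 'tl': 'Panlapi', 'abbreviations': ['affix', 'pnl'], 'variants': []},
--     'idiom': {'en': 'Idiom', 'tl': 'Idyoma', 'abbreviations': ['idm'], 'variants': []},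
--     'colloquial': {'en': 'Colloquial', 'tl': 'Kolokyal', 'abbreviations': ['col'], 'variants': []},
--     'synonym': {'en': 'Synonym', 'tl': 'Singkahulugan', 'abbreviations': ['syn'], 'variants': []},
--     'antonym': {'en': 'Antonym', 'tl': 'Di-kasingkahulugan', 'abbreviations': ['ant'], 'variants': []},
--     'english': {'en': 'English', 'tl': 'Ingles', 'abbreviations': ['eng'], 'variants': []},
--     'spanish': {'en': 'Spanish', 'tl': 'Espanyol', 'abbreviations': ['spa'], 'variants': []},
--     'texting': {'en': 'Texting', 'tl': 'Texting', 'abbreviations': ['tx'], 'variants': []},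
--     'variant': {'en': 'Variant', 'tl': 'Varyant', 'abbreviations': ['var'], 'variants': []},
--     'uncategorized': {'en': 'Uncategorized', 'tl': 'Hindi Tiyak', 'abbreviations': ['unc'], 'variants': []}
-- }
--
-- def standardize_pos(pos: str) -> str:
--     if not pos:
--         return ""
--     pos_lower = pos.lower().strip()
--     for key, mapping in POS_MAPPING.items():
--         if pos_lower in {mapping['en'].lower(), mapping['tl'].lower(), key.lower()} or \
--            pos_lower in {abbr.lower().strip('.') for abbr in mapping['abbreviations']} or \
--            pos_lower in {var.lower() for var in mapping['variants']}:
--             return mapping['tl']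
--     return pos
-- ===== SOURCE B (Python) =====
-- # Flat alias -> Tagalog-label table written out once; a single dict lookup replaces A's per-call scan over POS_MAPPING (idiomatic).
-- _POS_LOOKUP = {
--     'noun': 'Pangngalan',
--     'pangngalan': 'Pangngalan',
--     'n': 'Pangngalan',
--     'png': 'Pangngalan',
--     'adjective': 'Pang-uri',
--     'pang-uri': 'Pang-uri',
--     'adj': 'Pang-uri',
--     'pnr': 'Pang-uri',
--     'verb': 'Pandiwa',
--     'pandiwa': 'Pandiwa',
--     'v': 'Pandiwa',
--     'pnw': 'Pandiwa',
--     'adverb': 'Pang-abay',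
--     'pang-abay': 'Pang-abay',
--     'adv': 'Pang-abay',
--     'pny': 'Pang-abay',
--     'pronoun': 'Panghalip',
--     'panghalip': 'Panghalip',
--     'pron': 'Panghalip',
--     'preposition': 'Pang-ukol',
--     'pang-ukol': 'Pang-ukol',
--     'prep': 'Pang-ukol',
--     'conjunction': 'Pangatnig',
--     'pangatnig': 'Pangatnig',
--     'conj': 'Pangatnig',
--     'interjection': 'Pandamdam',
--     'pandamdam': 'Pandamdam',
--     'intj': 'Pandamdam',
--     'affix': 'Panlapi',
--     'panlapi': 'Panlapi',
--     'pnl': 'Panlapi',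
--     'idiom': 'Idyoma',
--     'idyoma': 'Idyoma',
--     'idm': 'Idyoma',
--     'colloquial': 'Kolokyal',
--     'kolokyal': 'Kolokyal',
--     'col': 'Kolokyal',
--     'synonym': 'Singkahulugan',
--     'singkahulugan': 'Singkahulugan',
--     'syn': 'Singkahulugan',
--     'antonym': 'Di-kasingkahulugan',
--     'di-kasingkahulugan': 'Di-kasingkahulugan',
--     'ant': 'Di-kasingkahulugan',
--     'english': 'Ingles',
--     'ingles': 'Ingles',
--     'eng': 'Ingles',
--     'spanish': 'Espanyol',
--     'espanyol': 'Espanyol',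
--     'spa': 'Espanyol',
--     'texting': 'Texting',
--     'tx': 'Texting',
--     'variant': 'Varyant',
--     'varyant': 'Varyant',
--     'var': 'Varyant',
--     'uncategorized': 'Hindi Tiyak',
--     'hindi tiyak': 'Hindi Tiyak',
--     'unc': 'Hindi Tiyak',
-- }
--
-- def standardize_pos(pos: str) -> str:
--     if not pos:
--         return ""
--     return _POS_LOOKUP.get(pos.lower().strip(), pos)
-- ===== Notes on version B (the rewrite author's own statement) =====
-- stated objective: idiomatic
-- what changed: replaces the per-call scan over all 18 POS_MAPPING entries (rebuilding three alias sets per entry on every call) with one flat literal alias-to-Tagalog-label dict and a single dict lookup per call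
import Mathlib
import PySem

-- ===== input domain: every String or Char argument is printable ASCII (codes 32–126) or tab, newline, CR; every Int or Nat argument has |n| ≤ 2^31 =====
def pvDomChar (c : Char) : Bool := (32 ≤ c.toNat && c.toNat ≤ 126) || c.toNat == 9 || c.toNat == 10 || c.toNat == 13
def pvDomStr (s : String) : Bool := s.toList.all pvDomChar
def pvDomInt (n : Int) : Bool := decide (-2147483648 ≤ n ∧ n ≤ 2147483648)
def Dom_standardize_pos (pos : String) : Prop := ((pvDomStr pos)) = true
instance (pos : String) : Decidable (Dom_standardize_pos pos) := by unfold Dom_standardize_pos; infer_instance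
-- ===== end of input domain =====

-- B replaces A's per-call scan over POS_MAPPING (alias sets rebuilt each call) with one flat literal alias->label dict and a single lookup (idiomatic).


-- ===== PORT A =====
-- the module constant POS_MAPPING: (key, en, tl, abbreviations, variants) in dict insertion order
def posEntries : List (String × String × String × List String × List String) :=
  [ ("noun", "Noun", "Pangngalan", ["n", "png"], []),
    ("adjective", "Adjective", "Pang-uri", ["adj", "pnr"], []),
    ("verb", "Verb", "Pandiwa", ["v", "pnw"], []),
    ("adverb", "Adverb", "Pang-abay", ["adv", "pny"], []),
    ("pronoun", "Pronoun", "Panghalip", ["pron"], []),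
    ("preposition", "Preposition", "Pang-ukol", ["prep"], []),
    ("conjunction", "Conjunction", "Pangatnig", ["conj"], []),
    ("interjection", "Interjection", "Pandamdam", ["intj"], []),
    ("affix", "Affix", "Panlapi", ["affix", "pnl"], []),
    ("idiom", "Idiom", "Idyoma", ["idm"], []),
    ("colloquial", "Colloquial", "Kolokyal", ["col"], []),
    ("synonym", "Synonym", "Singkahulugan", ["syn"], []),
    ("antonym", "Antonym", "Di-kasingkahulugan", ["ant"], []),
    ("english", "English", "Ingles", ["eng"], []),
    ("spanish", "Spanish", "Espanyol", ["spa"], []),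
    ("texting", "Texting", "Texting", ["tx"], []),
    ("variant", "Variant", "Varyant", ["var"], []),
    ("uncategorized", "Uncategorized", "Hindi Tiyak", ["unc"], []) ]

-- A's loop: 'for key, mapping in POS_MAPPING.items(): if pos_lower in {…} or …: return mapping["tl"]'
def pvScanA (t : String) : List (String × String × String × List String × List String) → Option String
  | [] => none
  | (key, en, tl, abbrs, vars) :: rest =>
    if t ∈ [PySem.Str.lower en, PySem.Str.lower tl, PySem.Str.lower key]
       ∨ t ∈ abbrs.map (fun a => PySem.Str.stripChars (PySem.Str.lower a) ".")
       ∨ t ∈ vars.map PySem.Str.lower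
    then some tl else pvScanA t rest

def standardize_pos (pos : String) : String :=
  if pos = "" then ""
  else
    match pvScanA (PySem.Str.strip (PySem.Str.lower pos)) posEntries with
    | some v => v
    | none => pos

-- ===== PORT B =====
-- Source B's literal flat dict _POS_LOOKUP, as an association list (its keys are pairwise distinct)
def pvFlatTable : List (String × String) :=
  [ ("noun", "Pangngalan"),
    ("pangngalan", "Pangngalan"),
    ("n", "Pangngalan"),
    ("png", "Pangngalan"),
    ("adjective", "Pang-uri"),
    ("pang-uri", "Pang-uri"),
    ("adj", "Pang-uri"),
    ("pnr", "Pang-uri"),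
    ("verb", "Pandiwa"),
    ("pandiwa", "Pandiwa"),
    ("v", "Pandiwa"),
    ("pnw", "Pandiwa"),
    ("adverb", "Pang-abay"),
    ("pang-abay", "Pang-abay"),
    ("adv", "Pang-abay"),
    ("pny", "Pang-abay"),
    ("pronoun", "Panghalip"),
    ("panghalip", "Panghalip"),
    ("pron", "Panghalip"),
    ("preposition", "Pang-ukol"),
    ("pang-ukol", "Pang-ukol"),
    ("prep", "Pang-ukol"),
    ("conjunction", "Pangatnig"),
    ("pangatnig", "Pangatnig"),
    ("conj", "Pangatnig"),
    ("interjection", "Pandamdam"),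
    ("pandamdam", "Pandamdam"),
    ("intj", "Pandamdam"),
    ("affix", "Panlapi"),
    ("panlapi", "Panlapi"),
    ("pnl", "Panlapi"),
    ("idiom", "Idyoma"),
    ("idyoma", "Idyoma"),
    ("idm", "Idyoma"),
    ("colloquial", "Kolokyal"),
    ("kolokyal", "Kolokyal"),
    ("col", "Kolokyal"),
    ("synonym", "Singkahulugan"),
    ("singkahulugan", "Singkahulugan"),
    ("syn", "Singkahulugan"),
    ("antonym", "Di-kasingkahulugan"),
    ("di-kasingkahulugan", "Di-kasingkahulugan"),
    ("ant", "Di-kasingkahulugan"),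
    ("english", "Ingles"),
    ("ingles", "Ingles"),
    ("eng", "Ingles"),
    ("spanish", "Espanyol"),
    ("espanyol", "Espanyol"),
    ("spa", "Espanyol"),
    ("texting", "Texting"),
    ("tx", "Texting"),
    ("variant", "Varyant"),
    ("varyant", "Varyant"),
    ("var", "Varyant"),
    ("uncategorized", "Hindi Tiyak"),
    ("hindi tiyak", "Hindi Tiyak"),
    ("unc", "Hindi Tiyak") ]

-- dict.get on a literal dict with distinct keys = first-match lookup in the association list
def pvLookup (t : String) : List (String × String) → Option String
  | [] => none
  | (k, v) :: rest => if t = k then some v else pvLookup t rest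

def standardize_pos_alt (pos : String) : String :=
  if pos = "" then ""
  else (pvLookup (PySem.Str.strip (PySem.Str.lower pos)) pvFlatTable).getD pos

-- ===== PRECONDITION & SPEC =====
def Spec_standardize_pos (pos : String) (out : String) : Prop := out = standardize_pos_alt pos
instance (pos : String) (out : String) : Decidable (Spec_standardize_pos pos out) := by unfold Spec_standardize_pos; infer_instance

-- ===== CLAIM (what is proved, stated in full; the proofs are below) =====
def Claim_equal_standardize_pos : Prop := ∀ (pos : String), Dom_standardize_pos pos → Spec_standardize_pos pos (standardize_pos pos)

-- ===== LEMMAS AND PROOFS =====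

-- all normalized aliases of one entry, in Source B's build order (key, en, tl, abbreviations, variants)
def pvAliasB (e : String × String × String × List String × List String) : List String :=
  [PySem.Str.lower e.1, PySem.Str.lower e.2.1, PySem.Str.lower e.2.2.1]
    ++ e.2.2.2.1.map (fun x => PySem.Str.stripChars (PySem.Str.lower x) ".")
    ++ e.2.2.2.2.map PySem.Str.lower

-- the full (undeduplicated) alias->label pair list of a list of entries
def pvFlatFull (es : List (String × String × String × List String × List String)) : List (String × String) :=
  es.flatMap (fun e => (pvAliasB e).map (fun a => (a, e.2.2.1)))

-- first-wins key dedup with an explicit seen set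
def pvDedup : List (String × String) → List String → List (String × String)
  | [], _ => []
  | (k, v) :: rest, seen =>
    if k ∈ seen then pvDedup rest seen else (k, v) :: pvDedup rest (k :: seen)

theorem pvLookup_map_const (t v : String) (as : List String) :
    pvLookup t (as.map (fun a => (a, v))) = if t ∈ as then some v else none := by
  induction as with
  | nil => simp [pvLookup]
  | cons a as ih => by_cases h : t = a <;> simp [pvLookup, h, ih]

theorem pvLookup_append (t : String) (l1 l2 : List (String × String)) :
    pvLookup t (l1 ++ l2) = (pvLookup t l1).or (pvLookup t l2) := by
  induction l1 with
  | nil => simp [pvLookup]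
  | cons p l1 ih =>
    obtain ⟨k, v⟩ := p
    by_cases h : t = k <;> simp [pvLookup, h, ih]

-- rotating a three-element list does not change membership
theorem pvMem3 {α : Type} (x a b c : α) : x ∈ [a, b, c] ↔ x ∈ [c, a, b] := by
  simp only [List.mem_cons, List.not_mem_nil, or_false]
  constructor
  · rintro (h | h | h)
    · exact Or.inr (Or.inl h)
    · exact Or.inr (Or.inr h)
    · exact Or.inl h
  · rintro (h | h | h)
    · exact Or.inr (Or.inr h)
    · exact Or.inl h
    · exact Or.inr (Or.inl h)

-- A's per-entry membership condition is membership in that entry's alias list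
theorem pvCond_iff (t : String) (e : String × String × String × List String × List String) :
    (t ∈ [PySem.Str.lower e.2.1, PySem.Str.lower e.2.2.1, PySem.Str.lower e.1]
       ∨ t ∈ e.2.2.2.1.map (fun x => PySem.Str.stripChars (PySem.Str.lower x) ".")
       ∨ t ∈ e.2.2.2.2.map PySem.Str.lower)
    ↔ t ∈ pvAliasB e := by
  rw [pvAliasB, List.append_assoc, List.mem_append, List.mem_append,
    pvMem3 t (PySem.Str.lower e.2.1) (PySem.Str.lower e.2.2.1) (PySem.Str.lower e.1)]

-- A's first-match scan = lookup in the full flattened pair list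
theorem pvScan_eq_full (t : String) (es : List (String × String × String × List String × List String)) :
    pvScanA t es = pvLookup t (pvFlatFull es) := by
  induction es with
  | nil => simp [pvScanA, pvFlatFull, pvLookup]
  | cons e es ih =>
    obtain ⟨key, en, tl, abbrs, vars⟩ := e
    rw [pvScanA]
    simp only [pvFlatFull, List.flatMap_cons, pvLookup_append, pvLookup_map_const]
    rw [← pvFlatFull]
    by_cases h : (t ∈ [PySem.Str.lower en, PySem.Str.lower tl, PySem.Str.lower key]
       ∨ t ∈ abbrs.map (fun a => PySem.Str.stripChars (PySem.Str.lower a) ".")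
       ∨ t ∈ vars.map PySem.Str.lower)
    · rw [if_pos h, if_pos ((pvCond_iff t (key, en, tl, abbrs, vars)).mp h)]; rfl
    · rw [if_neg h, if_neg (fun hm => h ((pvCond_iff t (key, en, tl, abbrs, vars)).mpr hm)), ih]; rfl

-- first-wins dedup never changes first-match lookup
theorem pvLookup_dedup (t : String) (l : List (String × String)) (seen : List String) :
    pvLookup t (pvDedup l seen) = if t ∈ seen then none else pvLookup t l := by
  induction l generalizing seen with
  | nil => simp [pvDedup, pvLookup]
  | cons p rest ih =>
    obtain ⟨k, v⟩ := p
    rw [pvDedup]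
    by_cases hk : k ∈ seen
    · rw [if_pos hk, ih]
      by_cases ht : t ∈ seen
      · simp [ht]
      · have : t ≠ k := fun h => ht (h ▸ hk)
        simp [ht, pvLookup, this]
    · rw [if_neg hk]
      by_cases htk : t = k
      · subst htk
        rw [if_neg hk]
        simp [pvLookup]
      · rw [pvLookup, if_neg htk, ih]
        by_cases ht : t ∈ seen <;> simp [ht, htk, pvLookup]

-- Source B's literal table is exactly the deduplicated flattening of POS_MAPPING
theorem pvTable_eq : pvDedup (pvFlatFull posEntries) [] = pvFlatTable := by decide

theorem pvScan_eq_lookup (t : String) : pvScanA t posEntries = pvLookup t pvFlatTable := by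
  rw [pvScan_eq_full, ← pvTable_eq, pvLookup_dedup]
  simp

-- ===== VERDICT (by name: the statement is the Claim_ definition above) =====
theorem standardize_pos_spec : Claim_equal_standardize_pos := by
  intro pos _
  unfold Spec_standardize_pos standardize_pos standardize_pos_alt
  by_cases h : pos = ""
  · simp [h]
  · rw [if_neg h, if_neg h, pvScan_eq_lookup]
    cases pvLookup (PySem.Str.strip (PySem.Str.lower pos)) pvFlatTable <;> simp
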